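-- pv_equiv track=rewrite | github.com/krithikkambhampati/AAD_Fireflies | Levenshtein.py | find_approximate_matches
-- ===== SOURCE A (Python) =====
-- def levenshtein_distance(s1: str, s2: str) -> int:
--     """
--     Computes the Levenshtein edit distance between two strings.
--
--     Allowed operations:
--         - Insert  (cost 1)
--         - Delete  (cost 1)
--         - Substitute (cost 1)
--
--     DP Relation (matches report):
--         dp[i][j] = minimum edits to convert s1[0..i] → s2[0..j]
--
--     Parameters
--     ----------
--     s1 : str
--         First string.
--     s2 : str
--         Second string.
--
--     Returns
--     -------
--     int
--         Minimum edit distance.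
--
--     Complexity
--     ----------
--     Time:  O(len(s1) * len(s2))
--     Space: O(len(s1) * len(s2))
--     """
--
--     n, m = len(s1), len(s2)
--
--     # Initialize DP matrix
--     dp = [[0]*(m+1) for _ in range(n+1)]
--
--     # Base cases:
--     # converting to/from empty string
--     for i in range(n+1):
--         dp[i][0] = i
--     for j in range(m+1):
--         dp[0][j] = j
--
--     # Fill DP table
--     for i in range(1, n+1):
--         for j in range(1, m+1):
--
--             if s1[i-1] == s2[j-1]:
--                 dp[i][j] = dp[i-1][j-1]   # no cost
--             else:
--                 dp[i][j] = 1 + min(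
--                     dp[i-1][j],    # deletion
--                     dp[i][j-1],    # insertion
--                     dp[i-1][j-1]   # substitution
--                 )
--
--     return dp[n][m]
--
-- def find_approximate_matches(text: str, pattern: str, k: int) -> list:
--     """
--     Find all positions where pattern matches text with at most k edits.
--
--     Parameters
--     ----------
--     text : str
--         The text to search in.
--     pattern : str
--         The pattern to search for.
--     k : int
--         Maximum allowed edit distance.
--
--     Returns
--     -------
--     list
--         Starting indices where pattern matches with ≤k edits.
--     """
--     matches = []
--     m = len(pattern)
--     n = len(text)
--
--     for i in range(n - m + 1):
--         window = text[i:i+m]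
--         distance = levenshtein_distance(pattern, window)
--         if distance <= k:
--             matches.append(i)
--
--     return matches
-- ===== SOURCE B (Python) =====
-- def find_approximate_matches(text: str, pattern: str, k: int) -> list:
--     m = len(pattern)
--     n = len(text)
--     matches = []
--     for i in range(n - m + 1):
--         if _within_k(pattern, text[i:i+m], k):
--             matches.append(i)
--     return matches
--
--
-- def _within_k(p: str, w: str, k: int) -> bool:
--     """Rolling single-row edit-distance DP with threshold cutoff:
--     stop as soon as every cell of the current row exceeds k."""
--     row = list(range(len(w) + 1))
--     for i, pc in enumerate(p, 1):
--         new = [i]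
--         for wc, diag, up in zip(w, row, row[1:]):
--             if pc == wc:
--                 cur = diag
--             else:
--                 cur = 1 + min(up, new[-1], diag)
--             new.append(cur)
--         row = new
--         if min(row) > k:
--             return False
--     return row[-1] <= k
-- ===== Notes on version B (the rewrite author's own statement) =====
-- stated objective: faster
-- what changed: Replaces the per-window full (m+1)x(m+1) Levenshtein matrix with a rolling single-row DP that stops early once every cell of the current row exceeds k (threshold cutoff), so most windows are rejected after ~k rows.
import Mathlib
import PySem

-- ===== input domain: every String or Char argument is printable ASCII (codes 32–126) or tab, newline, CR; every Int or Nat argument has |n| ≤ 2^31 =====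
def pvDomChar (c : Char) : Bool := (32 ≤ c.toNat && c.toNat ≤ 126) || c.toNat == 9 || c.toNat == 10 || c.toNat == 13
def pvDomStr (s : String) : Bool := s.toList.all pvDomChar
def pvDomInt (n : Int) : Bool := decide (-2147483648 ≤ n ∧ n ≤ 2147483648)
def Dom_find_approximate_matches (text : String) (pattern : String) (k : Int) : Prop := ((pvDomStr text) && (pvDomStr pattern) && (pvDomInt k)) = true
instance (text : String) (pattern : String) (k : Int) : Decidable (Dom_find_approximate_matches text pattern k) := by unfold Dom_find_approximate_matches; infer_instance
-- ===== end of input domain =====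

-- B replaces A's per-window full (m+1)×(m+1) Levenshtein matrix by a rolling single-row DP with a
-- threshold cutoff (stop once every cell of the current row exceeds k); objective: faster.

-- ===== PORT A =====
-- dp[i][j] read/write on the list-of-lists matrix (Python indices here are always in range)
def pvGet2 (dp : List (List Int)) (i j : Nat) : Int := (dp.getD i []).getD j 0
def pvSet2 (dp : List (List Int)) (i j : Nat) (v : Int) : List (List Int) :=
  dp.set i ((dp.getD i []).set j v)

def levenshtein_distance (s1 s2 : List Char) : Int :=
  let n := s1.length
  let m := s2.length
  -- dp = [[0]*(m+1) for _ in range(n+1)]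
  let dp0 : List (List Int) := (List.range (n+1)).map (fun _ => List.replicate (m+1) (0 : Int))
  -- for i in range(n+1): dp[i][0] = i
  let dp1 := (List.range (n+1)).foldl (fun dp i => pvSet2 dp i 0 (i : Int)) dp0
  -- for j in range(m+1): dp[0][j] = j
  let dp2 := (List.range (m+1)).foldl (fun dp j => pvSet2 dp 0 j (j : Int)) dp1
  -- for i in range(1, n+1): for j in range(1, m+1): …
  let dp3 := (List.range n).foldl (fun dp i0 =>
    (List.range m).foldl (fun dp j0 =>
      let i := i0 + 1
      let j := j0 + 1
      let v := if s1.getD (i-1) ' ' == s2.getD (j-1) ' ' then pvGet2 dp (i-1) (j-1)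
               else 1 + min (pvGet2 dp (i-1) j) (min (pvGet2 dp i (j-1)) (pvGet2 dp (i-1) (j-1)))
      pvSet2 dp i j v) dp) dp2
  pvGet2 dp3 n m

def find_approximate_matches (text : String) (pattern : String) (k : Int) : List Int :=
  let m : Int := pattern.toList.length
  let n : Int := text.toList.length
  (PySem.List.pyRange 0 (n - m + 1) 1).foldl (fun acc i =>
    let window := PySem.List.slice text.toList (some i) (some (i + m))
    let distance := levenshtein_distance pattern.toList window
    if distance ≤ k then acc ++ [i] else acc) []

-- ===== PORT B =====
-- inner loop of _within_k: walk zip(w, row, row[1:]) carrying new[-1] as `last`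
def pvRowStep (pc : Char) : Int → List (Char × Int × Int) → List Int
  | _, [] => []
  | last, (wc, diag, up) :: rest =>
    let cur := if pc == wc then diag else 1 + min up (min last diag)
    cur :: pvRowStep pc cur rest

-- outer loop of _within_k over the pattern characters, with the min(row) > k cutoff
-- (row is never empty, so the getLastD default is unreachable; min(row) is the running-min loop)
def pvWithinLoop (w : List Char) (k : Int) : List Char → Int → List Int → Bool
  | [], _, row => decide (row.getLastD 0 ≤ k)
  | pc :: ps, i, row =>
    let nwRest := pvRowStep pc i ((w.zip (row.zip row.tail)))
    let mn := nwRest.foldl min i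
    if k < mn then false else pvWithinLoop w k ps (i+1) (i :: nwRest)

def pvWithinK (p w : List Char) (k : Int) : Bool :=
  pvWithinLoop w k p 1 (PySem.List.pyRange 0 ((w.length : Int) + 1) 1)

def find_approximate_matches_alt (text : String) (pattern : String) (k : Int) : List Int :=
  let p := pattern.toList
  let t := text.toList
  let m : Int := p.length
  let n : Int := t.length
  (PySem.List.pyRange 0 (n - m + 1) 1).foldl (fun acc i =>
    if pvWithinK p (PySem.List.slice t (some i) (some (i + m))) k then acc ++ [i] else acc) []

-- ===== PRECONDITION & SPEC =====
def Spec_find_approximate_matches (text : String) (pattern : String) (k : Int) (out : List Int) : Prop := out = find_approximate_matches_alt text pattern k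
instance (text : String) (pattern : String) (k : Int) (out : List Int) : Decidable (Spec_find_approximate_matches text pattern k out) := by unfold Spec_find_approximate_matches; infer_instance

-- ===== CLAIM (what is proved, stated in full; the proofs are below) =====
def Claim_equal_find_approximate_matches : Prop := ∀ (text : String) (pattern : String) (k : Int), Dom_find_approximate_matches text pattern k → Spec_find_approximate_matches text pattern k (find_approximate_matches text pattern k)

-- ===== LEMMAS AND PROOFS =====

-- The common mathematical recurrence: pvL p w i j = edit distance between p[:i] and w[:j].
def pvL (p w : List Char) : Nat → Nat → Int
  | 0, j => (j : Int)
  | (i+1), 0 => ((i : Int) + 1)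
  | (i+1), (j+1) =>
    if p.getD i ' ' == w.getD j ' ' then pvL p w i j
    else 1 + min (pvL p w i (j+1)) (min (pvL p w (i+1) j) (pvL p w i j))
  termination_by i j => (i, j)

-- row i of the DP table
def pvRowF (p w : List Char) (i : Nat) : List Int := (List.range (w.length+1)).map (fun j => pvL p w i j)

theorem pvL_zero (p w : List Char) (j : Nat) : pvL p w 0 j = (j : Int) := by
  cases j <;> simp [pvL]

theorem pvL_succ_zero (p w : List Char) (i : Nat) : pvL p w (i+1) 0 = ((i : Int) + 1) := by
  simp [pvL]

theorem pvL_zero' (p w : List Char) (i : Nat) : pvL p w i 0 = (i : Int) := by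
  cases i with
  | zero => simp [pvL]
  | succ i => simp [pvL]

-- ===== A side =====

theorem pvSet_map_range {α : Type} (N i : Nat) (f : Nat → α) (v : α) :
    ((List.range N).map f).set i v = (List.range N).map (fun t => if t = i then v else f t) := by
  apply List.ext_getElem
  · simp
  · intro t h1 h2
    simp at h1
    simp [List.getElem_set]
    split_ifs with h h' h''
    · rfl
    · exact absurd h.symm h'
    · exact absurd h''.symm h
    · rfl

theorem pvDp1_inv (n m : Nat) : ∀ (t : Nat), t ≤ n+1 →
    (List.range t).foldl (fun dp i => pvSet2 dp i 0 (i : Int))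
      ((List.range (n+1)).map (fun _ : Nat => List.replicate (m+1) (0 : Int)))
    = (List.range (n+1)).map (fun i : Nat => if i < t then ((i : Int) :: List.replicate m 0) else List.replicate (m+1) (0:Int)) := by
  intro t
  induction t with
  | zero => intro _; simp
  | succ t ih =>
    intro ht
    rw [show List.range (t+1) = List.range t ++ [t] from List.range_succ, List.foldl_append, ih (by omega)]
    simp only [List.foldl_cons, List.foldl_nil]
    unfold pvSet2
    rw [PySem.List.getD_map_range _ _ _ _ (by omega)]
    simp only [if_neg (by omega : ¬ t < t)]
    rw [List.replicate_succ, List.set_cons_zero, pvSet_map_range]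
    apply List.map_congr_left
    intro i hi
    simp at hi
    split_ifs with h1 h2 h3 <;> first | rfl | (subst h1; rfl) | (exfalso; omega)

theorem pvDp1_eq (n m : Nat) :
    (List.range (n+1)).foldl (fun dp i => pvSet2 dp i 0 (i : Int))
      ((List.range (n+1)).map (fun _ : Nat => List.replicate (m+1) (0 : Int)))
    = (List.range (n+1)).map (fun i : Nat => ((i : Int) :: List.replicate m 0)) := by
  rw [pvDp1_inv n m (n+1) le_rfl]
  apply List.map_congr_left
  intro i hi
  simp at hi
  simp [Nat.lt_succ_of_le hi]

theorem pvDp2_inv (n m : Nat) : ∀ (t : Nat), t ≤ m+1 →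
    (List.range t).foldl (fun dp j => pvSet2 dp 0 j (j : Int))
      ((List.range (n+1)).map (fun i : Nat => ((i : Int) :: List.replicate m 0)))
    = (List.range (n+1)).map (fun i : Nat =>
        if i = 0 then (List.range (m+1)).map (fun j : Nat => if j < t then (j : Int) else 0)
        else ((i : Int) :: List.replicate m 0)) := by
  intro t
  induction t with
  | zero =>
    intro _
    simp only [List.range_zero, List.foldl_nil]
    apply List.map_congr_left
    intro i hi
    split_ifs with h
    · subst h
      simp [List.replicate_succ.symm]
    · rfl
  | succ t ih =>
    intro ht
    rw [show List.range (t+1) = List.range t ++ [t] from List.range_succ, List.foldl_append, ih (by omega)]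
    simp only [List.foldl_cons, List.foldl_nil]
    unfold pvSet2
    rw [PySem.List.getD_map_range _ _ _ _ (by omega : 0 < n+1)]
    simp only [↓reduceIte]
    rw [pvSet_map_range, pvSet_map_range]
    apply List.map_congr_left
    intro i hi
    simp at hi
    split_ifs with h1 <;> try rfl
    · subst h1
      apply List.map_congr_left
      intro j hj
      simp at hj
      split_ifs <;> first | rfl | (exfalso; omega) | (subst_vars; rfl)

-- the matrix during the main double loop: rows ≤ i0 final, row i0+1 filled up to column c, rest initial
def pvMat (p w : List Char) (i0 c : Nat) : List (List Int) :=
  (List.range (p.length+1)).map (fun r : Nat =>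
    if r ≤ i0 then pvRowF p w r
    else if r = i0+1 then (List.range (w.length+1)).map (fun j : Nat => if j ≤ c then pvL p w r j else 0)
    else ((r : Int) :: List.replicate w.length 0))

theorem pvGet2_pvMat_full (p w : List Char) (i0 c j : Nat) (hi : i0 ≤ p.length) (hj : j ≤ w.length) :
    pvGet2 (pvMat p w i0 c) i0 j = pvL p w i0 j := by
  unfold pvGet2 pvMat
  rw [PySem.List.getD_map_range _ _ _ _ (by omega)]
  rw [if_pos le_rfl]
  unfold pvRowF
  rw [PySem.List.getD_map_range _ _ _ _ (by omega)]

theorem pvGet2_pvMat_mid (p w : List Char) (i0 c j : Nat) (hi : i0 < p.length) (hj : j ≤ w.length) (hjc : j ≤ c) :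
    pvGet2 (pvMat p w i0 c) (i0+1) j = pvL p w (i0+1) j := by
  unfold pvGet2 pvMat
  rw [PySem.List.getD_map_range _ _ _ _ (by omega)]
  rw [if_neg (by omega), if_pos rfl]
  rw [PySem.List.getD_map_range _ _ _ _ (by omega), if_pos hjc]

theorem pvInner_step (p w : List Char) (i0 c : Nat) (hi : i0 < p.length) (hc : c < w.length) :
    (fun dp j0 =>
      let i := i0 + 1
      let j := j0 + 1
      let v := if p.getD (i-1) ' ' == w.getD (j-1) ' ' then pvGet2 dp (i-1) (j-1)
               else 1 + min (pvGet2 dp (i-1) j) (min (pvGet2 dp i (j-1)) (pvGet2 dp (i-1) (j-1)))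
      pvSet2 dp i j v) (pvMat p w i0 c) c = pvMat p w i0 (c+1) := by
  dsimp only
  simp only [Nat.add_sub_cancel]
  rw [pvGet2_pvMat_full p w i0 c c (by omega) (by omega),
      pvGet2_pvMat_full p w i0 c (c+1) (by omega) (by omega),
      pvGet2_pvMat_mid p w i0 c c hi (by omega) le_rfl]
  rw [show (if p.getD i0 ' ' == w.getD c ' ' then pvL p w i0 c
        else 1 + min (pvL p w i0 (c+1)) (min (pvL p w (i0+1) c) (pvL p w i0 c)))
      = pvL p w (i0+1) (c+1) from by conv_rhs => rw [pvL]]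
  unfold pvSet2
  have hrow : (pvMat p w i0 c).getD (i0+1) [] = (List.range (w.length+1)).map (fun j : Nat => if j ≤ c then pvL p w (i0+1) j else 0) := by
    unfold pvMat
    rw [PySem.List.getD_map_range _ _ _ _ (by omega)]
    rw [if_neg (by omega), if_pos rfl]
  rw [hrow, pvSet_map_range]
  unfold pvMat
  rw [pvSet_map_range]
  apply List.map_congr_left
  intro r hr
  simp at hr
  by_cases hr1 : r = i0+1
  · subst hr1
    rw [if_pos rfl, if_neg (by omega), if_pos rfl]
    apply List.map_congr_left
    intro j hj
    simp at hj
    split_ifs <;> first | rfl | (subst_vars; rfl) | (exfalso; omega)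
  · rw [if_neg hr1]
    split_ifs <;> rfl

theorem pvInner_inv (p w : List Char) (i0 : Nat) (hi : i0 < p.length) : ∀ (c : Nat), c ≤ w.length →
    (List.range c).foldl (fun dp j0 =>
      let i := i0 + 1
      let j := j0 + 1
      let v := if p.getD (i-1) ' ' == w.getD (j-1) ' ' then pvGet2 dp (i-1) (j-1)
               else 1 + min (pvGet2 dp (i-1) j) (min (pvGet2 dp i (j-1)) (pvGet2 dp (i-1) (j-1)))
      pvSet2 dp i j v) (pvMat p w i0 0) = pvMat p w i0 c := by
  intro c
  induction c with
  | zero => intro _; simp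
  | succ c ih =>
    intro hc
    rw [show List.range (c+1) = List.range c ++ [c] from List.range_succ, List.foldl_append, ih (by omega)]
    simp only [List.foldl_cons, List.foldl_nil]
    exact pvInner_step p w i0 c hi (by omega)

def pvOut (p w : List Char) (t : Nat) : List (List Int) :=
  (List.range (p.length+1)).map (fun r : Nat =>
    if r ≤ t then pvRowF p w r else ((r : Int) :: List.replicate w.length 0))

theorem pvMat_zero (p w : List Char) (i0 : Nat) : pvMat p w i0 0 = pvOut p w i0 := by
  apply List.map_congr_left
  intro r hr
  by_cases h1 : r ≤ i0
  · rw [if_pos h1, if_pos h1]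
  · by_cases h2 : r = i0+1
    · rw [if_neg h1, if_pos h2, if_neg h1]
      subst h2
      apply List.ext_getElem
      · simp
      · intro j hj1 hj2
        simp only [List.getElem_map, List.getElem_range]
        cases j with
        | zero => simp [pvL_zero']
        | succ j => simp
    · rw [if_neg h1, if_neg h2, if_neg h1]

theorem pvMat_full (p w : List Char) (i0 : Nat) : pvMat p w i0 w.length = pvOut p w (i0+1) := by
  apply List.map_congr_left
  intro r hr
  by_cases h1 : r ≤ i0
  · rw [if_pos h1, if_pos (by omega : r ≤ i0+1)]
  · by_cases h2 : r = i0+1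
    · rw [if_neg h1, if_pos h2, if_pos (by omega : r ≤ i0+1)]
      subst h2
      unfold pvRowF
      apply List.map_congr_left
      intro j hj
      simp at hj
      rw [if_pos (by omega)]
    · rw [if_neg h1, if_neg h2, if_neg (by omega : ¬ r ≤ i0+1)]

theorem pvDp3_inv (p w : List Char) : ∀ (t : Nat), t ≤ p.length →
    (List.range t).foldl (fun dp i0 =>
      (List.range w.length).foldl (fun dp j0 =>
        let i := i0 + 1
        let j := j0 + 1
        let v := if p.getD (i-1) ' ' == w.getD (j-1) ' ' then pvGet2 dp (i-1) (j-1)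
                 else 1 + min (pvGet2 dp (i-1) j) (min (pvGet2 dp i (j-1)) (pvGet2 dp (i-1) (j-1)))
        pvSet2 dp i j v) dp)
      (pvOut p w 0) = pvOut p w t := by
  intro t
  induction t with
  | zero => intro _; simp
  | succ t ih =>
    intro ht
    rw [show List.range (t+1) = List.range t ++ [t] from List.range_succ, List.foldl_append, ih (by omega)]
    simp only [List.foldl_cons, List.foldl_nil]
    rw [← pvMat_zero, pvInner_inv p w t (by omega) w.length le_rfl, pvMat_full]

theorem pvDp2_bridge (p w : List Char) :
    (List.range (p.length+1)).map (fun i : Nat =>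
        if i = 0 then (List.range (w.length+1)).map (fun j : Nat => if j < w.length+1 then (j : Int) else 0)
        else ((i : Int) :: List.replicate w.length 0)) = pvOut p w 0 := by
  apply List.map_congr_left
  intro i hi
  by_cases h : i = 0
  · subst h
    rw [if_pos rfl, if_pos le_rfl]
    unfold pvRowF
    apply List.map_congr_left
    intro j hj
    simp at hj
    rw [if_pos (by omega), pvL_zero]
  · rw [if_neg h, if_neg (by omega)]

theorem pvGet2_pvOut (p w : List Char) : pvGet2 (pvOut p w p.length) p.length w.length = pvL p w p.length w.length := by
  unfold pvGet2 pvOut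
  rw [PySem.List.getD_map_range _ _ _ _ (by omega), if_pos le_rfl]
  unfold pvRowF
  rw [PySem.List.getD_map_range _ _ _ _ (by omega)]

theorem pvLev_eq (p w : List Char) : levenshtein_distance p w = pvL p w p.length w.length := by
  simp only [levenshtein_distance]
  rw [pvDp1_eq, pvDp2_inv p.length w.length (w.length+1) le_rfl, pvDp2_bridge,
      pvDp3_inv p w p.length le_rfl, pvGet2_pvOut]

-- ===== B side =====

theorem pvRowF_cons (p w : List Char) (r : Nat) :
    pvRowF p w r = pvL p w r 0 :: (List.range w.length).map (fun t : Nat => pvL p w r (1+t)) := by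
  unfold pvRowF
  rw [List.range_succ_eq_map, List.map_cons, List.map_map]
  congr 1
  apply List.map_congr_left
  intro t _
  simp [Nat.add_comm]

theorem pvRowStep_spec (p w : List Char) (i : Nat) (hi : i < p.length) :
    ∀ (c j : Nat), j + c = w.length →
    pvRowStep p[i] (pvL p w (i+1) j)
      ((w.drop j).zip (((pvRowF p w i).drop j).zip ((pvRowF p w i).drop (j+1))))
    = (List.range c).map (fun t => pvL p w (i+1) (j+1+t)) := by
  intro c
  induction c with
  | zero =>
    intro j hj
    rw [show j = w.length from by omega, List.drop_length]
    simp [pvRowStep]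
  | succ c ih =>
    intro j hj
    have hjw : j < w.length := by omega
    rw [List.drop_eq_getElem_cons hjw,
        List.drop_eq_getElem_cons (by simp [pvRowF]; omega : j < (pvRowF p w i).length),
        List.drop_eq_getElem_cons (by simp [pvRowF]; omega : j+1 < (pvRowF p w i).length)]
    rw [List.zip_cons_cons, List.zip_cons_cons]
    have hrow : ∀ (t : Nat) (ht : t < w.length + 1), (pvRowF p w i)[t]'(by simp [pvRowF]; omega) = pvL p w i t := by
      intro t ht
      simp [pvRowF]
    rw [hrow j (by omega), hrow (j+1) (by omega)]
    simp only [pvRowStep]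
    have hcur : (if p[i] == w[j]'hjw then pvL p w i j
        else 1 + min (pvL p w i (j+1)) (min (pvL p w (i+1) j) (pvL p w i j))) = pvL p w (i+1) (j+1) := by
      conv_rhs => rw [pvL]
      rw [List.getD_eq_getElem p ' ' hi, List.getD_eq_getElem w ' ' hjw]
    rw [hcur]
    rw [show pvL p w i (j+1) :: List.drop (j+1+1) (pvRowF p w i) = List.drop (j+1) (pvRowF p w i) from by
      rw [List.drop_eq_getElem_cons (by simp [pvRowF]; omega : j+1 < (pvRowF p w i).length), hrow (j+1) (by omega)]]
    rw [ih (j+1) (by omega)]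
    rw [List.range_succ_eq_map, List.map_cons, List.map_map]
    norm_num
    intro a _
    congr 1
    omega

-- min of row i as the running-min loop
def pvRMin (p w : List Char) (i : Nat) : Int :=
  ((List.range w.length).map (fun t => pvL p w i (1+t))).foldl min (pvL p w i 0)

theorem pvLe_foldl_min (t : List Int) : ∀ (a c : Int), c ≤ a → (∀ y ∈ t, c ≤ y) → c ≤ t.foldl min a := by
  induction t with
  | nil => intro a c h _; simpa using h
  | cons x xs ih =>
    intro a c h hy
    simp only [List.foldl_cons]
    exact ih (min a x) c (le_min h (hy x (by simp))) (fun y hy' => hy y (by simp [hy']))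

theorem pvRMin_le (p w : List Char) (i j : Nat) (hj : j ≤ w.length) : pvRMin p w i ≤ pvL p w i j := by
  unfold pvRMin
  rcases Nat.eq_zero_or_pos j with h | h
  · subst h
    exact (PySem.List.foldl_min_le _ _).1
  · refine (PySem.List.foldl_min_le _ _).2 _ ?_
    refine List.mem_map.mpr ⟨j - 1, ?_, ?_⟩
    · simp; omega
    · congr 1; omega

theorem pvL_ge_rmin (p w : List Char) (i : Nat) : ∀ (j : Nat), j ≤ w.length → pvRMin p w i ≤ pvL p w (i+1) j := by
  intro j
  induction j with
  | zero =>
    intro _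
    calc pvRMin p w i ≤ pvL p w i 0 := pvRMin_le p w i 0 (by omega)
    _ ≤ pvL p w (i+1) 0 := by rw [pvL_zero', pvL_zero']; push_cast; omega
  | succ j ih =>
    intro hj
    have h1 : pvRMin p w i ≤ pvL p w i (j+1) := pvRMin_le p w i (j+1) hj
    have h2 : pvRMin p w i ≤ pvL p w i j := pvRMin_le p w i j (by omega)
    have h3 : pvRMin p w i ≤ pvL p w (i+1) j := ih (by omega)
    rw [pvL]
    split_ifs
    · exact h2
    · have := le_min h1 (le_min h3 h2)
      linarith

theorem pvRMin_mono (p w : List Char) (i : Nat) : pvRMin p w i ≤ pvRMin p w (i+1) := by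
  unfold pvRMin
  apply pvLe_foldl_min
  · exact pvL_ge_rmin p w i 0 (by omega)
  · intro y hy
    rcases List.mem_map.mp hy with ⟨t, ht, rfl⟩
    simp at ht
    exact pvL_ge_rmin p w i (1+t) (by omega)

theorem pvRMin_chain (p w : List Char) (i i' : Nat) (h : i ≤ i') : pvRMin p w i ≤ pvRMin p w i' := by
  induction i' with
  | zero => simp_all
  | succ i' ih =>
    rcases Nat.lt_or_ge i (i'+1) with h' | h'
    · exact le_trans (ih (by omega)) (pvRMin_mono p w i')
    · have : i = i' + 1 := by omega
      simp [this]

theorem pvRowF_getLastD (p w : List Char) (r : Nat) : (pvRowF p w r).getLastD 0 = pvL p w r w.length := by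
  unfold pvRowF
  rw [show List.range (w.length+1) = List.range w.length ++ [w.length] from List.range_succ]
  simp

theorem pvLoop_spec (p w : List Char) (k : Int) :
    ∀ (c i : Nat), i + c = p.length →
    pvWithinLoop w k (p.drop i) ((i : Int) + 1) (pvRowF p w i) = decide (pvL p w p.length w.length ≤ k) := by
  intro c
  induction c with
  | zero =>
    intro i hic
    rw [show i = p.length from by omega, List.drop_length]
    simp only [pvWithinLoop]
    rw [pvRowF_getLastD]
  | succ c ih =>
    intro i hic
    have hi : i < p.length := by omega
    rw [List.drop_eq_getElem_cons hi]
    simp only [pvWithinLoop]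
    have hstep := pvRowStep_spec p w i hi w.length 0 (by omega)
    rw [List.drop_zero, List.drop_zero, List.drop_one, pvL_succ_zero] at hstep
    rw [hstep]
    have hmn : ((List.range w.length).map (fun t => pvL p w (i+1) (0+1+t))).foldl min ((i : Int) + 1)
        = pvRMin p w (i+1) := by
      unfold pvRMin
      rw [pvL_succ_zero]
    rw [hmn]
    by_cases hk : k < pvRMin p w (i+1)
    · rw [if_pos hk]
      have h1 : pvRMin p w (i+1) ≤ pvRMin p w p.length := pvRMin_chain p w (i+1) p.length (by omega)
      have h2 : pvRMin p w p.length ≤ pvL p w p.length w.length := pvRMin_le p w p.length w.length le_rfl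
      symm
      simp only [decide_eq_false_iff_not]
      omega
    · rw [if_neg hk]
      have hrow : ((i : Int) + 1) :: (List.range w.length).map (fun t => pvL p w (i+1) (0+1+t)) = pvRowF p w (i+1) := by
        rw [pvRowF_cons, pvL_succ_zero]
      rw [hrow]
      have := ih (i+1) (by omega)
      rw [show ((i+1 : Nat) : Int) + 1 = ((i : Int) + 1) + 1 from by push_cast; ring] at this
      exact this

theorem pvWithinK_eq (p w : List Char) (k : Int) :
    pvWithinK p w k = decide (levenshtein_distance p w ≤ k) := by
  unfold pvWithinK
  rw [pvLev_eq]
  have hr : PySem.List.pyRange 0 ((w.length : Int) + 1) 1 = pvRowF p w 0 := by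
    rw [PySem.List.pyRange_one]
    unfold pvRowF
    rw [show (((w.length : Int) + 1) - 0).toNat = w.length + 1 from by omega]
    apply List.map_congr_left
    intro j _
    rw [pvL_zero]
    omega
  rw [hr]
  have := pvLoop_spec p w k p.length 0 (by omega)
  rw [List.drop_zero] at this
  simpa using this

-- ===== VERDICT (by name: the statement is the Claim_ definition above) =====
theorem find_approximate_matches_spec : Claim_equal_find_approximate_matches := by
  intro text pattern k _
  unfold Spec_find_approximate_matches find_approximate_matches find_approximate_matches_alt
  apply PySem.List.foldl_congr_mem
  intro acc i _
  rw [pvWithinK_eq]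
  simp
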